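-- pv_equiv track=rewrite | github.com/sneha-yadav786/python_practices | prob-3803.py | residuePrefixes
-- ===== SOURCE A (Python) =====
-- def residuePrefixes(s: str) -> int:
--     result, uniq = 0, set()
--     for i, char in enumerate(s):
--         uniq.add(char)
--         if len(uniq) == (i + 1) % 3:
--             result += 1
--         elif len(uniq) > 2:
--             break
--
--     return result
-- ===== SOURCE B (Python) =====
-- def residuePrefixes(s: str) -> int:
--     n = len(s)
--     if n == 0:
--         return 0
--     c0 = s[0]
--     p1, c1 = n, None
--     for i in range(n):
--         if s[i] != c0:
--             p1, c1 = i, s[i]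
--             break
--     p2 = n
--     for i in range(p1 + 1, n):
--         if s[i] != c0 and s[i] != c1:
--             p2 = i
--             break
--
--     def cnt(lo, hi, r):
--         return (hi - r + 2) // 3 - (lo - r + 2) // 3
--
--     return cnt(0, p1, 0) + cnt(p1, p2, 1)
-- ===== Notes on version B (the rewrite author's own statement) =====
-- stated objective: faster
-- what changed: A keeps a running set of seen characters and tests its size against (i+1)%3 at every index; B instead locates the two break points (first second-distinct and first third-distinct character) with plain scans and returns a closed-form count of indices with the right residue mod 3 in each segment, with no set and no per-index counting.
import Mathlib
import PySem

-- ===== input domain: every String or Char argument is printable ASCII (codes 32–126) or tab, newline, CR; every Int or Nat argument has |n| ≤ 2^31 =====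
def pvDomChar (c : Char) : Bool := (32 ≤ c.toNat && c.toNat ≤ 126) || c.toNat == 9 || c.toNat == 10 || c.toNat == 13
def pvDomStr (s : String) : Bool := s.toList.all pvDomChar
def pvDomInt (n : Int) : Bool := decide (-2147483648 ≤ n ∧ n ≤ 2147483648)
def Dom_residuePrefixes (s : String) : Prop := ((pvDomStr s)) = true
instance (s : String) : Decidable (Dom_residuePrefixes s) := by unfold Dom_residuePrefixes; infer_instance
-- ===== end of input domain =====

-- B replaces A's running set-and-count loop by two break-point scans (first 2nd distinct char,
-- first 3rd distinct char) plus a closed-form residue count per segment (objective: faster; a timing run measured B ≥ 1.5× faster).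

-- ===== PORT A =====
-- A's loop: running set of seen chars, count indices where |set| = (i+1) % 3, break on 3rd distinct char.
def pvLoopA : List Char → Nat → Int → PySem.Set Char → Int
  | [], _, result, _ => result
  | c :: rest, i, result, uniq =>
    let uniq' := PySem.Set.add uniq c
    if PySem.Set.len uniq' = PySem.Int.mod ((i : Int) + 1) 3 then
      pvLoopA rest (i + 1) (result + 1) uniq'
    else if PySem.Set.len uniq' > 2 then result
    else pvLoopA rest (i + 1) result uniq'

def residuePrefixes (s : String) : Int :=
  pvLoopA s.toList 0 0 PySem.Set.empty

-- ===== PORT B =====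
-- number of i in [lo, hi) with i % 3 = r, as the closed form Source B uses
def pvCnt (lo hi r : Int) : Int :=
  PySem.Int.floordiv (hi - r + 2) 3 - PySem.Int.floordiv (lo - r + 2) 3

-- first index ≥ i whose char differs from c0 (Source B's first loop), together with that char
def pvFindP1 : List Char → Char → Nat → Option (Nat × Char)
  | [], _, _ => none
  | c :: rest, c0, i => if c ≠ c0 then some (i, c) else pvFindP1 rest c0 (i + 1)

-- first index ≥ i whose char differs from both c0 and c1 (Source B's second loop)
def pvFindP2 : List Char → Char → Char → Nat → Option Nat
  | [], _, _, _ => none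
  | c :: rest, c0, c1, i => if c ≠ c0 ∧ c ≠ c1 then some i else pvFindP2 rest c0 c1 (i + 1)

def residuePrefixes_alt (s : String) : Int :=
  match s.toList with
  | [] => 0
  | c0 :: rest =>
    let n := (c0 :: rest).length
    match pvFindP1 (c0 :: rest) c0 0 with
    | none => pvCnt 0 n 0 + pvCnt n n 1
    | some (p1, c1) =>
      let p2 := (pvFindP2 ((c0 :: rest).drop (p1 + 1)) c0 c1 (p1 + 1)).getD n
      pvCnt 0 p1 0 + pvCnt p1 p2 1

-- ===== PRECONDITION & SPEC =====
def Spec_residuePrefixes (s : String) (out : Int) : Prop := out = residuePrefixes_alt s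
instance (s : String) (out : Int) : Decidable (Spec_residuePrefixes s out) := by unfold Spec_residuePrefixes; infer_instance

-- ===== CLAIM (what is proved, stated in full; the proofs are below) =====
def Claim_equal_residuePrefixes : Prop := ∀ (s : String), Dom_residuePrefixes s → Spec_residuePrefixes s (residuePrefixes s)

-- ===== LEMMAS AND PROOFS =====

lemma pvCnt_self (a r : Int) : pvCnt a a r = 0 := by simp [pvCnt]

-- peeling one index off the closed-form residue count, r = 1
lemma pvGlue1 (i X : Nat) (acc : Int) (h : i < X) :
    (acc + if (i + 1) % 3 = 2 then (1 : Int) else 0) + pvCnt (((i + 1) : Nat) : Int) ((X : Nat) : Int) 1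
      = acc + pvCnt ((i : Nat) : Int) ((X : Nat) : Int) 1 := by
  unfold pvCnt
  simp only [PySem.Int.floordiv_eq_ediv_of_pos (by norm_num : (0:Int) < 3)]
  split_ifs with h1 <;> push_cast <;> omega

-- peeling one index off the closed-form residue count, r = 0
lemma pvGlue0 (i X : Nat) (acc : Int) (h : i < X) :
    (acc + if (i + 1) % 3 = 1 then (1 : Int) else 0) + pvCnt (((i + 1) : Nat) : Int) ((X : Nat) : Int) 0
      = acc + pvCnt ((i : Nat) : Int) ((X : Nat) : Int) 0 := by
  unfold pvCnt
  simp only [PySem.Int.floordiv_eq_ediv_of_pos (by norm_num : (0:Int) < 3)]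
  split_ifs with h1 <;> push_cast <;> omega

lemma pvCnt_zero_step (X : Nat) (h : 0 < X) :
    pvCnt 0 ((X : Nat) : Int) 0 = 1 + pvCnt (((1 : Nat)) : Int) ((X : Nat) : Int) 0 := by
  unfold pvCnt
  simp only [PySem.Int.floordiv_eq_ediv_of_pos (by norm_num : (0:Int) < 3)]
  push_cast
  omega

lemma pvFindP1_le (l : List Char) (c0 : Char) :
    ∀ (i p : Nat) (c : Char), pvFindP1 l c0 i = some (p, c) → i ≤ p := by
  induction l with
  | nil => intro i p c h; simp [pvFindP1] at h
  | cons a t ih =>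
    intro i p c h
    by_cases ha : a = c0
    · simp [pvFindP1, ha] at h
      exact Nat.le_of_succ_le (ih (i + 1) p c h)
    · simp [pvFindP1, ha] at h
      omega

lemma pvFindP2_le (l : List Char) (c0 c1 : Char) :
    ∀ (i p : Nat), pvFindP2 l c0 c1 i = some p → i ≤ p := by
  induction l with
  | nil => intro i p h; simp [pvFindP2] at h
  | cons a t ih =>
    intro i p h
    by_cases ha : a ≠ c0 ∧ a ≠ c1
    · simp [pvFindP2, ha] at h; omega
    · simp [pvFindP2, ha] at h
      exact Nat.le_of_succ_le (ih (i + 1) p h)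

lemma pvMod3 (i : Nat) : PySem.Int.mod ((i : Int) + 1) 3 = (((i + 1) % 3 : Nat) : Int) := by
  have := PySem.Int.mod_natCast (i + 1) 3
  push_cast at this ⊢
  omega

-- the loop once both c0 and a second char c1 have been seen (uniq = {c0, c1})
lemma pvPhase2 (c0 c1 : Char) (hne : c1 ≠ c0) :
    ∀ (l : List Char) (i : Nat) (acc : Int),
      pvLoopA l i acc [c0, c1] =
        match pvFindP2 l c0 c1 i with
        | none => acc + pvCnt i (i + l.length : Nat) 1
        | some p2 => acc + pvCnt i p2 1 := by
  intro l
  induction l with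
  | nil => intro i acc; simp [pvLoopA, pvFindP2, pvCnt_self]
  | cons c t ih =>
    intro i acc
    by_cases hc : c = c0 ∨ c = c1
    · have hadd : PySem.Set.add [c0, c1] c = [c0, c1] := by
        rcases hc with h | h <;> simp [PySem.Set.add, PySem.Set.contains, h]
      have hlen : PySem.Set.len ([c0, c1] : PySem.Set Char) = 2 := by
        simp [PySem.Set.len]
      have hstep : pvLoopA (c :: t) i acc [c0, c1]
          = pvLoopA t (i + 1) (acc + (if (i + 1) % 3 = 2 then 1 else 0)) [c0, c1] := by
        simp only [pvLoopA, hadd, hlen]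
        by_cases h2 : (i + 1) % 3 = 2
        · rw [if_pos (by rw [pvMod3, h2]; norm_num), if_pos h2]
        · rw [if_neg (by rw [pvMod3]; intro h; exact h2 (by exact_mod_cast h.symm)),
              if_neg (by norm_num : ¬ ((2:Int) > 2)), if_neg h2]
          simp
      have hfind : pvFindP2 (c :: t) c0 c1 i = pvFindP2 t c0 c1 (i + 1) := by
        simp only [pvFindP2]
        rw [if_neg]
        rintro ⟨h0, h1⟩
        rcases hc with h | h
        · exact h0 h
        · exact h1 h
      rw [hstep, ih (i + 1), hfind]
      cases hf : pvFindP2 t c0 c1 (i + 1) with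
      | none =>
        simp only
        have hX : (i + 1) + t.length = i + (c :: t).length := by simp; omega
        rw [hX]
        exact pvGlue1 i (i + (c :: t).length) acc (by simp)
      | some p2 =>
        simp only
        have hp2 : i + 1 ≤ p2 := pvFindP2_le t c0 c1 (i + 1) p2 hf
        exact pvGlue1 i p2 acc (by omega)
    · obtain ⟨h0, h1⟩ := not_or.mp hc
      have hadd : PySem.Set.add [c0, c1] c = [c0, c1, c] := by
        simp [PySem.Set.add, PySem.Set.contains, h0, h1]
      have hlen : PySem.Set.len ([c0, c1, c] : PySem.Set Char) = 3 := by
        simp [PySem.Set.len]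
      have hfind : pvFindP2 (c :: t) c0 c1 i = some i := by
        simp [pvFindP2, h0, h1]
      rw [hfind]
      simp only [pvLoopA, hadd, hlen]
      have hmodlt : (i + 1) % 3 < 3 := Nat.mod_lt _ (by norm_num)
      rw [if_neg (by rw [pvMod3]; intro h; omega),
          if_pos (by norm_num : ((3:Int) > 2))]
      rw [pvCnt_self]
      ring
    
-- the loop while only c0 has been seen (uniq = {c0})
lemma pvPhase1 (c0 : Char) :
    ∀ (l : List Char) (i : Nat) (acc : Int),
      pvLoopA l i acc [c0] =
        match pvFindP1 l c0 i with
        | none => acc + pvCnt i (i + l.length : Nat) 0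
        | some (p1, c1) =>
            acc + pvCnt i p1 0 +
              (match pvFindP2 (l.drop (p1 + 1 - i)) c0 c1 (p1 + 1) with
               | none => pvCnt p1 (i + l.length : Nat) 1
               | some p2 => pvCnt p1 p2 1) := by
  intro l
  induction l with
  | nil => intro i acc; simp [pvLoopA, pvFindP1, pvCnt_self]
  | cons c t ih =>
    intro i acc
    by_cases hc : c = c0
    · subst hc
      have hadd : PySem.Set.add [c] c = [c] := by
        simp [PySem.Set.add, PySem.Set.contains]
      have hlen : PySem.Set.len ([c] : PySem.Set Char) = 1 := by
        simp [PySem.Set.len]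
      have hstep : pvLoopA (c :: t) i acc [c]
          = pvLoopA t (i + 1) (acc + (if (i + 1) % 3 = 1 then 1 else 0)) [c] := by
        simp only [pvLoopA, hadd, hlen]
        by_cases h1 : (i + 1) % 3 = 1
        · rw [if_pos (by rw [pvMod3, h1]; norm_num), if_pos h1]
        · rw [if_neg (by rw [pvMod3]; intro h; exact h1 (by exact_mod_cast h.symm)),
              if_neg (by norm_num : ¬ ((1:Int) > 2)), if_neg h1]
          simp
      have hfind : pvFindP1 (c :: t) c i = pvFindP1 t c (i + 1) := by
        simp [pvFindP1]
      rw [hstep, ih (i + 1), hfind]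
      cases hf : pvFindP1 t c (i + 1) with
      | none =>
        simp only
        have hX : (i + 1) + t.length = i + (c :: t).length := by simp; omega
        rw [hX]
        exact pvGlue0 i (i + (c :: t).length) acc (by simp)
      | some pc =>
        obtain ⟨p1, c1⟩ := pc
        have hp1 : i + 1 ≤ p1 := pvFindP1_le t c (i + 1) p1 c1 hf
        simp only
        have hdrop : (c :: t).drop (p1 + 1 - i) = t.drop (p1 + 1 - (i + 1)) := by
          have h2 : p1 + 1 - i = (p1 + 1 - (i + 1)) + 1 := by omega
          rw [h2]; rfl
        have hX : (i + 1) + t.length = i + (c :: t).length := by simp; omega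
        rw [hdrop, hX, ← pvGlue0 i p1 acc (by omega)]
    · have hadd : PySem.Set.add [c0] c = [c0, c] := by
        simp [PySem.Set.add, PySem.Set.contains, hc]
      have hlen2 : PySem.Set.len ([c0, c] : PySem.Set Char) = 2 := by
        simp [PySem.Set.len]
      have hstep : pvLoopA (c :: t) i acc [c0]
          = pvLoopA t (i + 1) (acc + (if (i + 1) % 3 = 2 then 1 else 0)) [c0, c] := by
        simp only [pvLoopA, hadd, hlen2]
        by_cases h2 : (i + 1) % 3 = 2
        · rw [if_pos (by rw [pvMod3, h2]; norm_num), if_pos h2]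
        · rw [if_neg (by rw [pvMod3]; intro h; exact h2 (by exact_mod_cast h.symm)),
              if_neg (by norm_num : ¬ ((2:Int) > 2)), if_neg h2]
          simp
      have hfind : pvFindP1 (c :: t) c0 i = some (i, c) := by
        simp [pvFindP1, hc]
      rw [hstep, pvPhase2 c0 c hc t (i + 1), hfind]
      simp only
      have hdrop : (c :: t).drop (i + 1 - i) = t := by
        have h2 : i + 1 - i = 1 := by omega
        rw [h2]; rfl
      rw [hdrop, pvCnt_self]
      cases hf : pvFindP2 t c0 c (i + 1) with
      | none =>
        simp only
        have hX : (i + 1) + t.length = i + (c :: t).length := by simp; omega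
        rw [hX]
        linarith [pvGlue1 i (i + (c :: t).length) acc (by simp : i < i + (c :: t).length)]
      | some p2 =>
        simp only
        have hp2 : i + 1 ≤ p2 := pvFindP2_le t c0 c (i + 1) p2 hf
        linarith [pvGlue1 i p2 acc (by omega : i < p2)]

lemma pvMain (l : List Char) : pvLoopA l 0 0 PySem.Set.empty =
    (match l with
     | [] => 0
     | c0 :: rest =>
       match pvFindP1 (c0 :: rest) c0 0 with
       | none => pvCnt 0 (c0 :: rest).length 0 + pvCnt (c0 :: rest).length (c0 :: rest).length 1
       | some (p1, c1) =>
         pvCnt 0 p1 0 +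
           pvCnt p1 ((pvFindP2 ((c0 :: rest).drop (p1 + 1)) c0 c1 (p1 + 1)).getD (c0 :: rest).length) 1) := by
  cases l with
  | nil => simp [pvLoopA]
  | cons c0 rest =>
    have hadd : PySem.Set.add PySem.Set.empty c0 = [c0] := by
      simp [PySem.Set.add, PySem.Set.contains, PySem.Set.empty]
    have hcond0 : PySem.Set.len ([c0] : PySem.Set Char) = PySem.Int.mod (((0 : Nat) : Int) + 1) 3 := by
      rw [pvMod3 0]; simp [PySem.Set.len]
    have hfirst : pvLoopA (c0 :: rest) 0 0 PySem.Set.empty = pvLoopA rest 1 1 [c0] := by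
      simp only [pvLoopA, hadd]
      rw [if_pos hcond0]
      norm_num
    have hfind0 : pvFindP1 (c0 :: rest) c0 0 = pvFindP1 rest c0 1 := by
      simp [pvFindP1]
    rw [hfirst, pvPhase1 c0 rest 1 1]
    simp only [hfind0]
    cases hf : pvFindP1 rest c0 1 with
    | none =>
      simp only
      rw [pvCnt_self]
      have hX : 1 + rest.length = (c0 :: rest).length := by simp; omega
      rw [hX, pvCnt_zero_step (c0 :: rest).length (by simp)]
      ring
    | some pc =>
      obtain ⟨p1, c1⟩ := pc
      have hp1 : 1 ≤ p1 := pvFindP1_le rest c0 1 p1 c1 hf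
      simp only
      have hdrop : (c0 :: rest).drop (p1 + 1) = rest.drop (p1 + 1 - 1) := by
        have h2 : p1 + 1 = (p1 + 1 - 1) + 1 := by omega
        rw [h2]; rfl
      have hX : 1 + rest.length = (c0 :: rest).length := by simp; omega
      rw [hdrop, hX, pvCnt_zero_step p1 (by omega)]
      cases hf2 : pvFindP2 (rest.drop (p1 + 1 - 1)) c0 c1 (p1 + 1) with
      | none => simp
      | some p2 => simp

-- ===== VERDICT (by name: the statement is the Claim_ definition above) =====
theorem residuePrefixes_spec : Claim_equal_residuePrefixes := by
  intro s _
  unfold Spec_residuePrefixes residuePrefixes residuePrefixes_alt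
  exact pvMain s.toList
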